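-- pv_equiv track=rewrite | github.com/Cap-LINKid/LINKid-AI | src/expert/aggregate_agent.py | _calculate_pi_ndi_scores
-- ===== SOURCE A (Python) =====
-- from typing import Dict, Any
--
-- def _calculate_pi_ndi_scores(utterances_labeled: list) -> Dict[str, int]:
--     """
--     DPICS 라벨링 결과를 기반으로 PI score와 NDI score 계산
--     부모 발화와 아이 발화 모두 포함하여 계산
--
--     PI (Positive Interaction) score: 긍정적 상호작용 비율
--     - PR (Praise) + RD (Reflection) 비율을 0-100 점수로 변환
--
--     NDI (Negative Directiveness Index) score: 부정적 지시성 지수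
--     - NEG (Negative) + CMD (Command) 비율을 0-100 점수로 변환
--
--     Args:
--         utterances_labeled: 라벨링된 발화 리스트 (부모 + 아이 발화 모두 포함)
--
--     Returns:
--         {"pi_score": int, "ndi_score": int}
--     """
--     if not utterances_labeled:
--         return {"pi_score": 50, "ndi_score": 50}
--
--     # 모든 발화 사용 (부모 + 아이)
--     total = len(utterances_labeled)
--
--     # PI score 계산: PR (Praise) + RD (Reflection) 비율
--     positive_count = sum(
--         1 for utt in utterances_labeled
--         if utt.get("label") in ["PR", "RD"]
--     )
--     pi_ratio = positive_count / total if total > 0 else 0.0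
--     pi_score = int(round(pi_ratio * 100))
--
--     # NDI score 계산: NEG (Negative) + CMD (Command) 비율
--     negative_count = sum(
--         1 for utt in utterances_labeled
--         if utt.get("label") in ["NEG", "CMD"]
--     )
--     ndi_ratio = negative_count / total if total > 0 else 0.0
--     ndi_score = int(round(ndi_ratio * 100))
--
--     return {
--         "pi_score": min(100, max(0, pi_score)),  # 0-100 범위로 제한
--         "ndi_score": min(100, max(0, ndi_score))  # 0-100 범위로 제한
--     }
-- ===== SOURCE B (Python) =====
-- from typing import Dict
--
-- # Each label contributes a (pi, ndi) weight vector; one fused pass accumulates both tallies.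
-- _WEIGHTS = {"PR": (1, 0), "RD": (1, 0), "NEG": (0, 1), "CMD": (0, 1)}
--
-- def _score(count, total):
--     s = int(round(count / total * 100))
--     return min(100, max(0, s))
--
-- def _calculate_pi_ndi_scores(utterances_labeled: list) -> Dict[str, int]:
--     if not utterances_labeled:
--         return {"pi_score": 50, "ndi_score": 50}
--     pos = 0
--     neg = 0
--     for utt in utterances_labeled:
--         dp, dn = _WEIGHTS.get(utt.get("label"), (0, 0))
--         pos += dp
--         neg += dn
--     total = len(utterances_labeled)
--     return {"pi_score": _score(pos, total), "ndi_score": _score(neg, total)}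
-- ===== Notes on version B (the rewrite author's own statement) =====
-- stated objective: alternative
-- what changed: B replaces A's two separate membership-filter counting scans with one fused pass that accumulates a (pi, ndi) tally vector driven by a per-label weight table, and factors the ratio/round/clamp step into a shared _score helper.
import Mathlib
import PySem

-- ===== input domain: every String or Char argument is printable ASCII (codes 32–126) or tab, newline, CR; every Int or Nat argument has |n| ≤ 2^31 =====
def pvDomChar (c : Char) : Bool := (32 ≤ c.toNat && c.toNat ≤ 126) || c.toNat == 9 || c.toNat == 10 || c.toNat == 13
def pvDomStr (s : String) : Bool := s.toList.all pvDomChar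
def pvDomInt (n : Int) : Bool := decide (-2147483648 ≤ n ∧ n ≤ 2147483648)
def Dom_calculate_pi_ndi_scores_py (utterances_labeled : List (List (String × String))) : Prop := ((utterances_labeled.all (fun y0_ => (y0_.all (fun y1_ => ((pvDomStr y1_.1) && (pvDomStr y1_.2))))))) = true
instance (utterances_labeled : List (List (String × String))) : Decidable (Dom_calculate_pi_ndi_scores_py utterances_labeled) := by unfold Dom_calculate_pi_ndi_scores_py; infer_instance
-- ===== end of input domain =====

-- B replaces A's two membership-filter counting scans by one fused pass accumulating a
-- (pi, ndi) tally vector driven by a per-label weight table (objective: alternative);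
-- return values are proved equal on every input.

-- Shared float model: Python's `int(round((c/t)*100))` computes with IEEE-754 doubles, so the
-- ports model the two double roundings exactly (both Pythons evaluate this same expression).

-- round-half-even of n/d (d > 0): exactly Python's round() on an exact rational
def pvRndHalfEven (n d : Nat) : Nat :=
  let q := n / d
  let r := n % d
  if 2 * r < d then q else if d < 2 * r then q + 1 else if q % 2 = 0 then q else q + 1

-- is p/q ≥ 2^k ?
def pvGeTwoPow (p q : Nat) (k : Int) : Bool :=
  if 0 ≤ k then q * 2 ^ k.toNat ≤ p else q ≤ p * 2 ^ (-k).toNat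

-- nearest IEEE-754 double to the rational p/q (p ≥ 0, q > 0, well inside the normal range),
-- returned as an exact rational (numerator, power-of-two denominator)
def pvNearestDouble (p q : Nat) : Nat × Nat :=
  if p = 0 then (0, 1) else
  let e1 : Int := (Nat.log2 p : Int) - (Nat.log2 q : Int)
  let e : Int := if pvGeTwoPow p q (e1 + 1) then e1 + 1 else if pvGeTwoPow p q e1 then e1 else e1 - 1
  let s : Int := 52 - e
  let m : Nat := if 0 ≤ s then pvRndHalfEven (p * 2 ^ s.toNat) q else pvRndHalfEven p (q * 2 ^ (-s).toNat)
  let me : Nat × Int := if m = 2 ^ 53 then (m / 2, e + 1) else (m, e)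
  let ep : Int := me.2 - 52
  if 0 ≤ ep then (me.1 * 2 ^ ep.toNat, 1) else (me.1, 2 ^ (-ep).toNat)

-- int(round((c/t)*100)) with double division and double multiplication; c ≥ 0, t > 0 at all call sites
def pvPct (c t : Int) : Int :=
  let r1 := pvNearestDouble c.toNat t.toNat
  let r2 := pvNearestDouble (r1.1 * 100) r1.2
  (pvRndHalfEven r2.1 r2.2 : Int)

-- utt.get("label") on the association list of a Python dict
def pvLabel (utt : List (String × String)) : Option String :=
  (PySem.Dict.mk utt).get? "label"

-- ===== PORT A =====
def calculate_pi_ndi_scores_py (utterances_labeled : List (List (String × String))) : List (String × Int) :=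
  if utterances_labeled = [] then [("pi_score", 50), ("ndi_score", 50)]
  else
    let total : Int := utterances_labeled.length
    let positive_count : Int :=
      utterances_labeled.foldl
        (fun acc utt => if pvLabel utt ∈ [some "PR", some "RD"] then acc + 1 else acc) 0
    let pi_score : Int := if 0 < total then pvPct positive_count total else 0
    let negative_count : Int :=
      utterances_labeled.foldl
        (fun acc utt => if pvLabel utt ∈ [some "NEG", some "CMD"] then acc + 1 else acc) 0
    let ndi_score : Int := if 0 < total then pvPct negative_count total else 0
    [("pi_score", min 100 (max 0 pi_score)), ("ndi_score", min 100 (max 0 ndi_score))]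

-- ===== PORT B =====
-- the per-label weight table _WEIGHTS (Python dict keyed by strings)
def pvWeights : PySem.Dict String (Int × Int) :=
  PySem.Dict.mk [("PR", (1, 0)), ("RD", (1, 0)), ("NEG", (0, 1)), ("CMD", (0, 1))]

-- _WEIGHTS.get(utt.get("label"), (0, 0)): a None key never matches a string key
def pvWeightGet (l : Option String) : Int × Int :=
  match l with
  | none => (0, 0)
  | some s => pvWeights.getD s (0, 0)

-- _score(count, total)
def pvScore (count total : Int) : Int :=
  min 100 (max 0 (pvPct count total))

def calculate_pi_ndi_scores_py_alt (utterances_labeled : List (List (String × String))) : List (String × Int) :=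
  if utterances_labeled = [] then [("pi_score", 50), ("ndi_score", 50)]
  else
    let tally : Int × Int :=
      utterances_labeled.foldl
        (fun pn utt =>
          let w := pvWeightGet (pvLabel utt)
          (pn.1 + w.1, pn.2 + w.2)) (0, 0)
    let total : Int := utterances_labeled.length
    [("pi_score", pvScore tally.1 total), ("ndi_score", pvScore tally.2 total)]

-- ===== PRECONDITION & SPEC =====
def Spec_calculate_pi_ndi_scores_py (utterances_labeled : List (List (String × String))) (out : List (String × Int)) : Prop := out = calculate_pi_ndi_scores_py_alt utterances_labeled
instance (utterances_labeled : List (List (String × String))) (out : List (String × Int)) : Decidable (Spec_calculate_pi_ndi_scores_py utterances_labeled out) := by unfold Spec_calculate_pi_ndi_scores_py; infer_instance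

-- ===== CLAIM =====
def Claim_equal_calculate_pi_ndi_scores_py : Prop := ∀ (utterances_labeled : List (List (String × String))), Dom_calculate_pi_ndi_scores_py utterances_labeled → Spec_calculate_pi_ndi_scores_py utterances_labeled (calculate_pi_ndi_scores_py utterances_labeled)

-- ===== LEMMAS AND PROOFS =====

-- the weight table, characterised pointwise
theorem pvWeightGet_eq (l : Option String) :
    pvWeightGet l = ((if l ∈ [some "PR", some "RD"] then 1 else 0),
                     (if l ∈ [some "NEG", some "CMD"] then 1 else 0)) := by
  match l with
  | none => simp [pvWeightGet]
  | some s =>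
      by_cases h1 : s = "PR"
      · subst h1; decide
      by_cases h2 : s = "RD"
      · subst h2; decide
      by_cases h3 : s = "NEG"
      · subst h3; decide
      by_cases h4 : s = "CMD"
      · subst h4; decide
      simp [pvWeightGet, pvWeights, PySem.Dict.getD, PySem.Dict.get?,
        h1, h2, h3, h4, Ne.symm h1, Ne.symm h2, Ne.symm h3, Ne.symm h4]

-- B's fused vector tally equals the pair of A's two counting folds
theorem pv_tally_eq (us : List (List (String × String))) : ∀ (p n : Int),
    us.foldl (fun pn utt =>
        let w := pvWeightGet (pvLabel utt)
        (pn.1 + w.1, pn.2 + w.2)) (p, n)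
      = (us.foldl (fun acc utt => if pvLabel utt ∈ [some "PR", some "RD"] then acc + 1 else acc) p,
         us.foldl (fun acc utt => if pvLabel utt ∈ [some "NEG", some "CMD"] then acc + 1 else acc) n) := by
  induction us with
  | nil => intro p n; simp
  | cons x xs ih =>
      intro p n
      simp only [List.foldl_cons]
      have hstep : (let w := pvWeightGet (pvLabel x); ((p, n).1 + w.1, (p, n).2 + w.2))
          = (p + (pvWeightGet (pvLabel x)).1, n + (pvWeightGet (pvLabel x)).2) := rfl
      rw [hstep, pvWeightGet_eq, ih]
      by_cases h1 : pvLabel x ∈ [some "PR", some "RD"] <;>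
        by_cases h2 : pvLabel x ∈ [some "NEG", some "CMD"] <;> simp [h1, h2]

theorem calculate_pi_ndi_scores_py_spec_aux (us : List (List (String × String))) :
    calculate_pi_ndi_scores_py us = calculate_pi_ndi_scores_py_alt us := by
  unfold calculate_pi_ndi_scores_py calculate_pi_ndi_scores_py_alt
  by_cases h : us = []
  · simp [h]
  · have hlen : (0 : Int) < us.length := by
      cases us with
      | nil => exact absurd rfl h
      | cons y ys => simp
    simp only [if_neg h, if_pos hlen, pv_tally_eq us 0 0, pvScore]

-- ===== VERDICT =====
theorem calculate_pi_ndi_scores_py_spec : Claim_equal_calculate_pi_ndi_scores_py := by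
  intro us _
  unfold Spec_calculate_pi_ndi_scores_py
  exact calculate_pi_ndi_scores_py_spec_aux us
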